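-- pv_equiv track=rewrite | github.com/K-Wu/HET_nsight_utils | unit_converters.py | _simplify_unit_fraction
-- ===== SOURCE A (Python) =====
-- def _simplify_unit_fraction(
--     nominator: "list[str]", denominator: "list[str]"
-- ) -> tuple["list[str]", "list[str]"]:
--     # simplify the fraction
--     for idx in range(len(nominator)):
--         if nominator[idx] in denominator:
--             denominator[denominator.index(nominator[idx])] = ""
--             nominator[idx] = ""
--     nominator = [ele for ele in nominator if len(ele) > 0]
--     denominator = [ele for ele in denominator if len(ele) > 0]
--     return nominator, denominator
-- ===== SOURCE B (Python) =====
-- from collections import Counter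
--
-- def _simplify_unit_fraction(
--     nominator: "list[str]", denominator: "list[str]"
-- ) -> tuple["list[str]", "list[str]"]:
--     # Counter-based cancellation: one pass over each list instead of an
--     # inner scan per nominator element. (Return value only: A also blanks
--     # entries of its argument lists in place; B does not mutate them.)
--     avail = Counter(e for e in denominator if e)
--     cancel = Counter()
--     new_nom = []
--     for e in nominator:
--         if e and avail[e] > 0:
--             avail[e] -= 1
--             cancel[e] += 1
--         elif e:
--             new_nom.append(e)
--     new_den = []
--     for e in denominator:
--         if e and cancel[e] > 0:
--             cancel[e] -= 1
--         else:
--             if e: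
--                 new_den.append(e)
--     return new_nom, new_den
-- ===== Notes on version B (the rewrite author's own statement) =====
-- stated objective: faster
-- what changed: Replaces A's per-element inner scans of the denominator ('in' + '.index' inside the loop, plus in-place blanking) by two counters built in one pass (available denominator occurrences and cancelled occurrences), one pass over each list.
import Mathlib
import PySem

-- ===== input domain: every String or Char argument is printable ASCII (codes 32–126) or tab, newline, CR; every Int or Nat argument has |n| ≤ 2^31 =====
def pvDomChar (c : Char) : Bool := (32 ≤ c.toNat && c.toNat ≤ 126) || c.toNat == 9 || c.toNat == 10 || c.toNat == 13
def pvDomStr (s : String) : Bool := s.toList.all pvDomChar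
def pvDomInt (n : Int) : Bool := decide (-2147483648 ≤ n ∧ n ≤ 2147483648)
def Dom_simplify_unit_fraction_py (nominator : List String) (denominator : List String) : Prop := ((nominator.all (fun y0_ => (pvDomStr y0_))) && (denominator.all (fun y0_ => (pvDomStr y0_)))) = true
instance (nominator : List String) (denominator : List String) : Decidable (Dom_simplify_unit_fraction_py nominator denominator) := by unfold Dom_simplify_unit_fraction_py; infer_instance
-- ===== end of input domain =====

-- B replaces A's per-nominator-element inner scans of the denominator (membership + .index + in-place
-- blanking) by counter dictionaries built in one pass over each list.
-- Equivalence is about the RETURN value only: Python A also blanks entries of its argument lists in place.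


-- ===== PORT A =====
-- one iteration of A's 'for idx in range(len(nominator))' loop on the state (nominator, denominator)
def pvStepA (st : List String × List String) (idx : Int) : List String × List String :=
  match PySem.List.pyGet? st.1 idx with
  | none => st
  | some v =>
    if st.2.contains v then
      match PySem.List.index? st.2 v with
      | some j => (PySem.List.pySetD st.1 idx "", PySem.List.pySetD st.2 (j : Int) "")
      | none => st
    else st

def simplify_unit_fraction_py (nominator : List String) (denominator : List String) :
    List String × List String :=
  let st := (PySem.List.pyRange 0 (PySem.List.len nominator) 1).foldl pvStepA (nominator, denominator)
  (st.1.filter (fun e => 0 < PySem.Str.len e), st.2.filter (fun e => 0 < PySem.Str.len e))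

-- ===== PORT B =====
-- first pass of B: for e in nominator, building new_nom and the avail/cancel counters
def pvStepB1 (st : List String × PySem.Dict String Int × PySem.Dict String Int) (e : String) :
    List String × PySem.Dict String Int × PySem.Dict String Int :=
  if e ≠ "" ∧ 0 < st.2.1.getD e 0 then
    (st.1, st.2.1.insert e (st.2.1.getD e 0 - 1), st.2.2.insert e (st.2.2.getD e 0 + 1))
  else if e ≠ "" then (st.1 ++ [e], st.2.1, st.2.2)
  else st

-- second pass of B: for e in denominator, dropping the first cancel[e] occurrences
def pvStepB2 (st : List String × PySem.Dict String Int) (e : String) :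
    List String × PySem.Dict String Int :=
  if e ≠ "" ∧ 0 < st.2.getD e 0 then (st.1, st.2.insert e (st.2.getD e 0 - 1))
  else if e ≠ "" then (st.1 ++ [e], st.2)
  else st

def simplify_unit_fraction_py_alt (nominator : List String) (denominator : List String) :
    List String × List String :=
  let avail := PySem.Dict.counter (denominator.filter (fun e => e ≠ ""))
  let r := nominator.foldl pvStepB1 ([], avail, PySem.Dict.empty)
  let d := denominator.foldl pvStepB2 ([], r.2.2)
  (r.1, d.1)

-- ===== PRECONDITION & SPEC =====
def Spec_simplify_unit_fraction_py (nominator : List String) (denominator : List String) (out : List String × List String) : Prop := out = simplify_unit_fraction_py_alt nominator denominator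
instance (nominator : List String) (denominator : List String) (out : List String × List String) : Decidable (Spec_simplify_unit_fraction_py nominator denominator out) := by unfold Spec_simplify_unit_fraction_py; infer_instance

-- ===== CLAIM (what is proved, stated in full; the proofs are below) =====
def Claim_equal_simplify_unit_fraction_py : Prop := ∀ (nominator : List String) (denominator : List String), Dom_simplify_unit_fraction_py nominator denominator → Spec_simplify_unit_fraction_py nominator denominator (simplify_unit_fraction_py nominator denominator)

-- ===== LEMMAS AND PROOFS =====

-- the counter bump used by the loop invariant
def pvInc (c : String → Nat) (h : String) : String → Nat := fun v => if v = h then c v + 1 else c v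

-- the denominator as A's loop keeps it: for each value v, the first (c v) occurrences blanked to ""
def pvBlank : List String → (String → Nat) → List String
  | [], _ => []
  | h :: t, c =>
    if h ≠ "" ∧ 0 < c h then "" :: pvBlank t (fun v => if v = h then c h - 1 else c v)
    else h :: pvBlank t c

lemma pvBlank_zero (l : List String) : pvBlank l (fun _ => 0) = l := by
  induction l with
  | nil => rfl
  | cons h t ih => simp [pvBlank, ih]

lemma pvLenPos (e : String) : (decide (0 < PySem.Str.len e)) = (decide (e ≠ "")) := by
  by_cases he : e = ""
  · subst he; rfl
  · have h2 : e.toList ≠ [] := fun h => he (by simpa using congrArg String.ofList h)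
    have h3 := List.length_pos_iff.mpr h2
    have h4 : PySem.Str.len e = e.toList.length := by simp [pysem]
    rw [decide_eq_true (show 0 < PySem.Str.len e by omega), decide_eq_true he]

lemma pvMem (l : List String) (c : String → Nat) (v : String) (hv : v ≠ "") :
    v ∈ pvBlank l c ↔ c v < l.count v := by
  induction l generalizing c with
  | nil => simp [pvBlank]
  | cons h t ih =>
    by_cases hh : h ≠ "" ∧ 0 < c h
    · simp only [pvBlank, if_pos hh, List.mem_cons]
      rw [ih]
      by_cases hvh : v = h
      · subst hvh
        obtain ⟨-, hpos⟩ := hh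
        simp [hv, List.count_cons]
        omega
      · simp [hv, hvh, List.count_cons, show ¬(h = v) from fun hc => hvh hc.symm]
    · simp only [pvBlank, if_neg hh, List.mem_cons]
      rw [ih]
      by_cases hvh : v = h
      · subst hvh
        have hc0 : c v = 0 := by
          rcases not_and_or.mp hh with h1 | h2
          · exact absurd hv (by simpa using h1)
          · omega
        simp [List.count_cons, hc0]
      · simp [hvh, List.count_cons, show ¬(h = v) from fun hc => hvh hc.symm]

lemma pvSetIdx (xs : List String) (v : String) (j : Nat)
    (h : PySem.List.index? xs v = some j) : xs.set j v = xs := by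
  obtain ⟨hk, hx, -⟩ := PySem.List.getElem_of_index?_eq_some h
  rw [← hx]
  exact List.set_getElem_self hk

lemma pvBlank_step (l : List String) (c : String → Nat) (h : String) (hne : h ≠ "")
    (hlt : c h < l.count h) :
    ∃ j, PySem.List.index? (pvBlank l c) h = some j ∧
      (pvBlank l c).set j "" = pvBlank l (pvInc c h) := by
  induction l generalizing c with
  | nil => simp at hlt
  | cons h' t ih =>
    by_cases hP : h' ≠ "" ∧ 0 < c h'
    · -- blanked head
      have hcnt : (fun v => if v = h' then c h' - 1 else c v) h < t.count h := by
        show (if h = h' then c h' - 1 else c h) < t.count h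
        by_cases hhh : h = h'
        · subst hhh
          simp only [List.count_cons_self] at hlt
          rw [if_pos rfl]
          obtain ⟨-, hpos⟩ := hP
          omega
        · rw [if_neg hhh]
          rw [List.count_cons, if_neg (by simpa using fun hc : h' = h => hhh hc.symm)] at hlt
          omega
      obtain ⟨j, hj, hset⟩ := ih (fun v => if v = h' then c h' - 1 else c v) hcnt
      refine ⟨j + 1, ?_, ?_⟩
      · rw [show pvBlank (h' :: t) c = "" :: pvBlank t _ from by rw [pvBlank, if_pos hP]]
        rw [show PySem.List.index? ("" :: pvBlank t (fun v => if v = h' then c h' - 1 else c v)) h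
            = (PySem.List.index? (pvBlank t (fun v => if v = h' then c h' - 1 else c v)) h).map (· + 1)
          from PySem.List.index?_cons_of_ne _ (Ne.symm hne), hj]; rfl
      · rw [show pvBlank (h' :: t) c = "" :: pvBlank t _ from by rw [pvBlank, if_pos hP]]
        have hP' : h' ≠ "" ∧ 0 < pvInc c h h' := by
          refine ⟨hP.1, ?_⟩
          show 0 < if h' = h then c h' + 1 else c h'
          have := hP.2
          split <;> omega
        rw [show pvBlank (h' :: t) (pvInc c h) = "" :: pvBlank t _ from by
          rw [pvBlank, if_pos hP']]
        simp only [List.set_cons_succ]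
        congr 1
        rw [hset]
        congr 1
        funext v
        simp only [pvInc]
        obtain ⟨-, hpos⟩ := hP
        by_cases hv1 : v = h <;> by_cases hv2 : v = h' <;> by_cases h3 : h = h' <;>
          simp_all <;> omega
    · by_cases hhh : h = h'
      · subst hhh
        have hc0 : c h = 0 := by
          rcases not_and_or.mp hP with h1 | h2
          · exact absurd hne (by simpa using h1)
          · omega
        refine ⟨0, ?_, ?_⟩
        · rw [show pvBlank (h :: t) c = h :: pvBlank t c from by rw [pvBlank, if_neg hP]]
          exact PySem.List.index?_cons_self h (pvBlank t c)
        · rw [show pvBlank (h :: t) c = h :: pvBlank t c from by rw [pvBlank, if_neg hP]]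
          have hP' : h ≠ "" ∧ 0 < pvInc c h h := ⟨hne, by simp [pvInc]⟩
          rw [show pvBlank (h :: t) (pvInc c h) = "" :: pvBlank t _ from by
            rw [pvBlank, if_pos hP']]
          simp only [List.set_cons_zero]
          congr 1
          congr 1
          funext v
          simp only [pvInc]
          by_cases hv : v = h <;> simp_all
      · -- head ≠ h, kept
        have hcnt : c h < t.count h := by
          rw [List.count_cons, if_neg (by simpa using fun hc : h' = h => hhh hc.symm)] at hlt
          omega
        obtain ⟨j, hj, hset⟩ := ih _ hcnt
        refine ⟨j + 1, ?_, ?_⟩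
        · rw [show pvBlank (h' :: t) c = h' :: pvBlank t c from by rw [pvBlank, if_neg hP]]
          rw [show PySem.List.index? (h' :: pvBlank t c) h
            = (PySem.List.index? (pvBlank t c) h).map (· + 1)
          from PySem.List.index?_cons_of_ne _ (Ne.symm hhh), hj]; rfl
        · rw [show pvBlank (h' :: t) c = h' :: pvBlank t c from by rw [pvBlank, if_neg hP]]
          have hP' : ¬ (h' ≠ "" ∧ 0 < pvInc c h h') := by
            intro ⟨a, b⟩
            apply hP
            refine ⟨a, ?_⟩
            have : pvInc c h h' = c h' := by simp [pvInc]; intro hc; exact absurd hc.symm hhh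
            rw [this] at b
            exact b
          rw [show pvBlank (h' :: t) (pvInc c h) = h' :: pvBlank t _ from by
            rw [pvBlank, if_neg hP']]
          simp only [List.set_cons_succ]
          congr 1

lemma pvDenFold (l : List String) : ∀ (c : String → Nat) (d : PySem.Dict String Int)
    (acc : List String), (∀ v, d.getD v 0 = (c v : Int)) →
    (l.foldl pvStepB2 (acc, d)).1 = acc ++ (pvBlank l c).filter (fun e => e ≠ "") := by
  induction l with
  | nil => intro c d acc hd; simp [pvBlank]
  | cons h t ih =>
    intro c d acc hd
    by_cases hP : h ≠ "" ∧ 0 < c h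
    · have hPd : h ≠ "" ∧ 0 < d.getD h 0 := ⟨hP.1, by rw [hd]; exact_mod_cast hP.2⟩
      rw [List.foldl_cons, show pvStepB2 (acc, d) h = (acc, d.insert h (d.getD h 0 - 1)) from by
        rw [pvStepB2, if_pos hPd]]
      rw [ih (fun v => if v = h then c h - 1 else c v) (d.insert h (d.getD h 0 - 1)) acc
        (fun v => by
          show (d.insert h (d.getD h 0 - 1)).getD v 0 = ((if v = h then c h - 1 else c v : Nat) : Int)
          rw [PySem.Dict.getD_insert]
          by_cases hv : v = h
          · rw [if_pos hv, if_pos hv, hd]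
            subst hv; have := hP.2; omega
          · rw [if_neg hv, if_neg hv]; exact hd v)]
      rw [show pvBlank (h :: t) c = "" :: pvBlank t _ from by rw [pvBlank, if_pos hP]]
      simp
    · by_cases hh : h = ""
      · subst hh
        rw [List.foldl_cons, show pvStepB2 (acc, d) "" = (acc, d) from by
          rw [pvStepB2]; simp]
        rw [ih c d acc hd]
        rw [show pvBlank ("" :: t) c = "" :: pvBlank t c from by rw [pvBlank, if_neg hP]]
        simp
      · have hc0 : c h = 0 := by
          rcases not_and_or.mp hP with h1 | h2
          · exact absurd hh (by simpa using h1)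
          · omega
        have hPd : ¬ (h ≠ "" ∧ 0 < d.getD h 0) := by
          intro ⟨a, b⟩; rw [hd, hc0] at b; omega
        rw [List.foldl_cons, show pvStepB2 (acc, d) h = (acc ++ [h], d) from by
          rw [pvStepB2, if_neg hPd, if_pos hh]]
        rw [ih c d (acc ++ [h]) hd]
        rw [show pvBlank (h :: t) c = h :: pvBlank t c from by rw [pvBlank, if_neg hP]]
        simp [hh]

lemma pvSetMid (pre t : List String) (x y : String) :
    (pre ++ x :: t).set pre.length y = pre ++ y :: t := by
  induction pre with
  | nil => rfl
  | cons p ps ih => simp [ih]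

lemma pvMain (den : List String) (rest : List String) :
    ∀ (prefA : List String) (c : String → Nat) (acc : List String)
      (availD cancelD : PySem.Dict String Int),
    (∀ v, v ≠ "" → availD.getD v 0 = (den.count v : Int) - (c v : Int)) →
    (∀ v, c v ≤ den.count v) →
    (∀ v, cancelD.getD v 0 = (c v : Int)) →
    acc = prefA.filter (fun e => e ≠ "") →
    ((PySem.List.pyRange (prefA.length : Int) ((prefA.length : Int) + rest.length) 1).foldl
        pvStepA (prefA ++ rest, pvBlank den c)).1.filter (fun e => e ≠ "")
      = (rest.foldl pvStepB1 (acc, availD, cancelD)).1 ∧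
    ∃ c', (∀ v, c' v ≤ den.count v) ∧
      (∀ v, (rest.foldl pvStepB1 (acc, availD, cancelD)).2.2.getD v 0 = (c' v : Int)) ∧
      ((PySem.List.pyRange (prefA.length : Int) ((prefA.length : Int) + rest.length) 1).foldl
        pvStepA (prefA ++ rest, pvBlank den c)).2 = pvBlank den c' := by
  induction rest with
  | nil =>
    intro prefA c acc availD cancelD hA hc hC hout
    simp only [List.length_nil, Nat.cast_zero, add_zero, List.append_nil, List.foldl_nil]
    rw [show PySem.List.pyRange (prefA.length : Int) (prefA.length : Int) 1 = [] from by
      simp [PySem.List.pyRange]]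
    exact ⟨hout.symm, c, hc, hC, rfl⟩
  | cons h t ih =>
    intro prefA c acc availD cancelD hA hc hC hout
    have hrange : PySem.List.pyRange (prefA.length : Int) ((prefA.length : Int) + (h :: t).length) 1
        = (prefA.length : Int) :: PySem.List.pyRange ((prefA.length : Int) + 1)
            ((prefA.length : Int) + (h :: t).length) 1 :=
      PySem.List.pyRange_one_cons (by simp only [List.length_cons]; push_cast; omega)
    rw [hrange, List.foldl_cons, List.foldl_cons]
    have hget : PySem.List.pyGet? (prefA ++ h :: t) ((prefA.length : Int)) = some h :=
      PySem.List.pyGet?_append_length prefA t h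
    have e2 : (((prefA ++ [h]).length : Nat) : Int) + ((t.length : Nat) : Int)
        = (prefA.length : Int) + ((h :: t).length : Int) := by
      simp only [List.length_append, List.length_cons, List.length_nil]; push_cast; ring
    have e1 : (((prefA ++ [h]).length : Nat) : Int) = (prefA.length : Int) + 1 := by
      simp only [List.length_append, List.length_cons, List.length_nil]; push_cast; ring
    by_cases hh : h = ""
    · -- empty-string nominator element: both steps leave the state unchanged
      subst hh
      have hstepB : pvStepB1 (acc, availD, cancelD) "" = (acc, availD, cancelD) := by
        rw [pvStepB1]; simp
      have hstepA : pvStepA (prefA ++ "" :: t, pvBlank den c) ((prefA.length : Int))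
          = (prefA ++ "" :: t, pvBlank den c) := by
        by_cases hcont : (pvBlank den c).contains ""
        · rcases hidx : PySem.List.index? (pvBlank den c) "" with _ | j
          · simp only [pvStepA, hget, hcont, hidx, reduceIte]
          · simp only [pvStepA, hget, hcont, hidx, PySem.List.pySetD_natCast, reduceIte]
            rw [pvSetMid, pvSetIdx _ _ _ hidx]
        · simp only [pvStepA, hget, Bool.not_eq_true] at *
          simp only [pvStepA, hget, hcont, Bool.false_eq_true, if_false]
      rw [hstepA, hstepB]
      have H := ih (prefA ++ [""]) c acc availD cancelD hA hc hC (by rw [hout]; simp)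
      rw [e2, e1, ← List.append_cons] at H
      exact H
    · by_cases hlt : c h < den.count h
      · -- cancellation step
        have hmem : h ∈ pvBlank den c := (pvMem den c h hh).2 hlt
        obtain ⟨j, hj, hset⟩ := pvBlank_step den c h hh hlt
        have hstepA : pvStepA (prefA ++ h :: t, pvBlank den c) ((prefA.length : Int))
            = (prefA ++ "" :: t, pvBlank den (pvInc c h)) := by
          have hcont : (pvBlank den c).contains h = true := by simpa using hmem
          simp only [pvStepA, hget, hcont, hj, PySem.List.pySetD_natCast, reduceIte]
          rw [pvSetMid, hset]
        have hBcond : h ≠ "" ∧ 0 < availD.getD h 0 := by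
          refine ⟨hh, ?_⟩
          rw [hA h hh]
          omega
        have hstepB : pvStepB1 (acc, availD, cancelD) h
            = (acc, availD.insert h (availD.getD h 0 - 1),
                cancelD.insert h (cancelD.getD h 0 + 1)) := by
          rw [pvStepB1, if_pos hBcond]
        rw [hstepA, hstepB]
        have H := ih (prefA ++ [""]) (pvInc c h) acc
          (availD.insert h (availD.getD h 0 - 1)) (cancelD.insert h (cancelD.getD h 0 + 1))
          (fun v hv => by
            rw [PySem.Dict.getD_insert]
            by_cases hvh : v = h
            · rw [if_pos hvh, hA h hh]
              subst hvh
              unfold pvInc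
              rw [if_pos rfl]
              push_cast
              ring
            · rw [if_neg hvh, hA v hv]
              unfold pvInc
              rw [if_neg hvh])
          (fun v => by
            unfold pvInc
            by_cases hvh : v = h
            · rw [if_pos hvh]; subst hvh; omega
            · rw [if_neg hvh]; exact hc v)
          (fun v => by
            rw [PySem.Dict.getD_insert]
            unfold pvInc
            by_cases hvh : v = h
            · rw [if_pos hvh, if_pos hvh, hC h]
              subst hvh
              push_cast
              ring
            · rw [if_neg hvh, if_neg hvh, hC v])
          (by rw [hout]; simp)
        have e1' : ((((prefA ++ [("" : String)]).length : Nat)) : Int) = (prefA.length : Int) + 1 := by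
          simp only [List.length_append, List.length_cons, List.length_nil]; push_cast; ring
        have e2' : ((((prefA ++ [("" : String)]).length : Nat)) : Int) + ((t.length : Nat) : Int)
            = (prefA.length : Int) + ((h :: t).length : Int) := by
          simp only [List.length_append, List.length_cons, List.length_nil]; push_cast; ring
        rw [e2', e1', ← List.append_cons] at H
        exact H
      · -- no cancellation: element kept
        have hnmem : h ∉ pvBlank den c := fun hm => hlt ((pvMem den c h hh).1 hm)
        have hstepA : pvStepA (prefA ++ h :: t, pvBlank den c) ((prefA.length : Int))
            = (prefA ++ h :: t, pvBlank den c) := by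
          have hcont : (pvBlank den c).contains h = false := by simpa using hnmem
          simp only [pvStepA, hget, hcont, Bool.false_eq_true, if_false]
        have hBcond : ¬ (h ≠ "" ∧ 0 < availD.getD h 0) := by
          intro ⟨_, hpos⟩
          rw [hA h hh] at hpos
          have := hc h
          omega
        have hstepB : pvStepB1 (acc, availD, cancelD) h = (acc ++ [h], availD, cancelD) := by
          rw [pvStepB1, if_neg hBcond, if_pos hh]
        rw [hstepA, hstepB]
        have H := ih (prefA ++ [h]) c (acc ++ [h]) availD cancelD hA hc hC
          (by rw [hout]; simp [hh])
        rw [e2, e1, ← List.append_cons] at H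
        exact H

-- ===== VERDICT (by name: the statement is the Claim_ definition above) =====
theorem simplify_unit_fraction_py_spec : Claim_equal_simplify_unit_fraction_py := by
  intro nom den _
  unfold Spec_simplify_unit_fraction_py
  have H := pvMain den nom [] (fun _ => 0) []
    (PySem.Dict.counter (den.filter (fun e => e ≠ ""))) PySem.Dict.empty
    (fun v hv => by
      rw [PySem.Dict.getD_counter]
      have hcf : (den.filter (fun e => decide (e ≠ ""))).count v = den.count v := by
        simp [List.count_filter, hv]
      rw [hcf]
      simp)
    (fun v => Nat.zero_le _)
    (fun v => by simp [PySem.Dict.getD_empty])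
    rfl
  rw [List.nil_append, pvBlank_zero] at H
  simp only [List.length_nil, Nat.cast_zero, zero_add] at H
  obtain ⟨h1, c', hc', hK, h2⟩ := H
  show ((((PySem.List.pyRange 0 (PySem.List.len nom) 1).foldl pvStepA (nom, den)).1.filter
          (fun e => 0 < PySem.Str.len e),
        ((PySem.List.pyRange 0 (PySem.List.len nom) 1).foldl pvStepA (nom, den)).2.filter
          (fun e => 0 < PySem.Str.len e)) : List String × List String)
      = ((nom.foldl pvStepB1 ([], PySem.Dict.counter (den.filter (fun e => e ≠ "")),
            PySem.Dict.empty)).1,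
         (den.foldl pvStepB2 ([], (nom.foldl pvStepB1 ([], PySem.Dict.counter
            (den.filter (fun e => e ≠ "")), PySem.Dict.empty)).2.2)).1)
  rw [show PySem.List.len nom = (nom.length : Int) from by simp [pysem]]
  rw [show (List.filter (fun e => 0 < PySem.Str.len e) :
        List String → List String) = List.filter (fun e => (e ≠ "")) from by
    funext l
    exact List.filter_congr (fun e _ => pvLenPos e)]
  refine Prod.ext ?_ ?_
  · exact h1
  · rw [h2, pvDenFold den c' _ [] hK, List.nil_append]
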